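-- pv_equiv track=rewrite | github.com/xuningy/scripts | make_video_grid.py | build_xstack_layout
-- ===== SOURCE A (Python) =====
-- def build_xstack_layout(n, rows, cols, cell_width, cell_height):
--     """Build the xstack layout string."""
--     layout_parts = []
--
--     for r in range(rows):
--         for c in range(cols):
--             idx = r * cols + c
--             if idx < n:
--                 x = c * cell_width
--                 y = r * cell_height
--                 layout_parts.append(f"{x}_{y}")
--
--     return "|".join(layout_parts)
-- ===== SOURCE B (Python) =====
-- def build_xstack_layout(n, rows, cols, cell_width, cell_height):
--     """Build the xstack layout string (single linear pass with divmod)."""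
--     count = min(n, rows * cols) if rows > 0 and cols > 0 else 0
--     return "|".join(
--         f"{idx % cols * cell_width}_{idx // cols * cell_height}"
--         for idx in range(count)
--     )
-- ===== Notes on version B (the rewrite author's own statement) =====
-- stated objective: faster
-- what changed: Replaces the nested row/column loops with an if-guard by one linear pass over range(min(n, rows*cols)) that recovers row/column via divmod, so cells beyond n are never visited.
import Mathlib
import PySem

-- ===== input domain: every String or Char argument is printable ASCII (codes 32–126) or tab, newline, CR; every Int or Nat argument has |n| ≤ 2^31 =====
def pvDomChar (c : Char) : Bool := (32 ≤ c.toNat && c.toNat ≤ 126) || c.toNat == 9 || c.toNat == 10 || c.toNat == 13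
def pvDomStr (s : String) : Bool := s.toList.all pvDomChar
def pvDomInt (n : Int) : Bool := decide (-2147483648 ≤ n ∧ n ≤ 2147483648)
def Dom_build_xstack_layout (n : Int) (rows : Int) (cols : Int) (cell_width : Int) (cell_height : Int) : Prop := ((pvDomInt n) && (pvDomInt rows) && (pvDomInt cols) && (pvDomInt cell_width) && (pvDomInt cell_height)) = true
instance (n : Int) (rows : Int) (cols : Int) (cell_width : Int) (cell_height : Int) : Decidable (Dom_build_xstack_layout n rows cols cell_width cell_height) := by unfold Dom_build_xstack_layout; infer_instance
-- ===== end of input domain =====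

-- B replaces A's nested row/column loops with a guard by a single linear pass over
-- range(min(n, rows*cols)) recovering row/column via divmod (objective: simpler).

-- ===== PORT A =====
def build_xstack_layout (n : Int) (rows : Int) (cols : Int) (cell_width : Int) (cell_height : Int) : String :=
  PySem.Str.join "|"
    ((PySem.List.pyRange 0 rows 1).foldl (fun acc r =>
      (PySem.List.pyRange 0 cols 1).foldl (fun acc2 c =>
        if r * cols + c < n then
          acc2 ++ [PySem.Int.toStr (c * cell_width) ++ "_" ++ PySem.Int.toStr (r * cell_height)]
        else acc2) acc) [])

-- ===== PORT B =====
def build_xstack_layout_alt (n : Int) (rows : Int) (cols : Int) (cell_width : Int) (cell_height : Int) : String :=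
  PySem.Str.join "|"
    ((PySem.List.pyRange 0 (if 0 < rows ∧ 0 < cols then min n (rows * cols) else 0) 1).map (fun idx =>
      PySem.Int.toStr (PySem.Int.mod idx cols * cell_width) ++ "_" ++
        PySem.Int.toStr (PySem.Int.floordiv idx cols * cell_height)))

-- ===== PRECONDITION & SPEC =====
def Spec_build_xstack_layout (n : Int) (rows : Int) (cols : Int) (cell_width : Int) (cell_height : Int) (out : String) : Prop := out = build_xstack_layout_alt n rows cols cell_width cell_height
instance (n : Int) (rows : Int) (cols : Int) (cell_width : Int) (cell_height : Int) (out : String) : Decidable (Spec_build_xstack_layout n rows cols cell_width cell_height out) := by unfold Spec_build_xstack_layout; infer_instance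

-- ===== CLAIM (what is proved, stated in full; the proofs are below) =====
def Claim_equal_build_xstack_layout : Prop := ∀ (n : Int) (rows : Int) (cols : Int) (cell_width : Int) (cell_height : Int), Dom_build_xstack_layout n rows cols cell_width cell_height → Spec_build_xstack_layout n rows cols cell_width cell_height (build_xstack_layout n rows cols cell_width cell_height)

-- ===== LEMMAS AND PROOFS =====

-- B's per-index cell string.
def pvCell (cols cell_width cell_height : Int) (idx : Int) : String :=
  PySem.Int.toStr (PySem.Int.mod idx cols * cell_width) ++ "_" ++
    PySem.Int.toStr (PySem.Int.floordiv idx cols * cell_height)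

theorem pv_foldl_const {α β : Type} (l : List β) (acc : α) :
    l.foldl (fun a (_ : β) => a) acc = acc := by
  induction l generalizing acc with
  | nil => rfl
  | cons x xs ih => simp [ih acc]

-- Inner loop of A, started at column a, equals the map of pvCell over the
-- matching linear-index range.
theorem pv_inner (n cols cw ch r : Int) (hc : 0 < cols) :
    ∀ (a : Int) (acc : List String), 0 ≤ a →
    (PySem.List.pyRange a cols 1).foldl (fun acc2 c =>
        if r * cols + c < n then
          acc2 ++ [PySem.Int.toStr (c * cw) ++ "_" ++ PySem.Int.toStr (r * ch)]
        else acc2) acc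
      = acc ++ (PySem.List.pyRange (r * cols + a) (min n ((r + 1) * cols)) 1).map
          (pvCell cols cw ch) := by
  intro a
  induction hk : (cols - a).toNat generalizing a with
  | zero =>
    intro acc ha
    have hge : cols ≤ a := by omega
    rw [PySem.List.pyRange_one_eq_nil hge,
        PySem.List.pyRange_one_eq_nil (by nlinarith [min_le_right n ((r+1)*cols)] : min n ((r+1)*cols) ≤ r * cols + a)]
    simp
  | succ k ih =>
    intro acc ha
    have hlt : a < cols := by omega
    rw [PySem.List.pyRange_one_cons hlt, List.foldl_cons]
    by_cases hn : r * cols + a < n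
    · rw [if_pos hn, ih (a + 1) (by omega) _ (by omega)]
      have hm : r * cols + a < min n ((r + 1) * cols) := by
        have : r * cols + a < (r + 1) * cols := by nlinarith
        omega
      rw [PySem.List.pyRange_one_cons hm]
      have hdiv : PySem.Int.floordiv (r * cols + a) cols = r := by
        rw [PySem.Int.floordiv_eq_iff_of_pos hc]
        constructor <;> nlinarith
      have hmod : PySem.Int.mod (r * cols + a) cols = a := by
        have := PySem.Int.floordiv_mul_add_mod (r * cols + a) cols
        rw [hdiv] at this; omega
      rw [show r * cols + (a + 1) = r * cols + a + 1 from by ring]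
      simp [pvCell, hdiv, hmod]
    · rw [if_neg hn, ih (a + 1) (by omega) _ (by omega)]
      have h1 : min n ((r + 1) * cols) ≤ r * cols + a := by omega
      rw [PySem.List.pyRange_one_eq_nil h1,
          PySem.List.pyRange_one_eq_nil (by omega : min n ((r+1)*cols) ≤ r * cols + (a + 1))]

-- Outer loop of A over t rows equals the map of pvCell over the capped linear range.
theorem pv_outer (n cols cw ch : Int) (hc : 0 < cols) (t : Nat) :
    (PySem.List.pyRange 0 (t : Int) 1).foldl (fun acc r =>
      (PySem.List.pyRange 0 cols 1).foldl (fun acc2 c =>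
        if r * cols + c < n then
          acc2 ++ [PySem.Int.toStr (c * cw) ++ "_" ++ PySem.Int.toStr (r * ch)]
        else acc2) acc) []
      = (PySem.List.pyRange 0 (min n ((t : Int) * cols)) 1).map (pvCell cols cw ch) := by
  induction t with
  | zero =>
    simp only [Nat.cast_zero, zero_mul]
    rw [PySem.List.pyRange_one_eq_nil (le_refl 0),
        PySem.List.pyRange_one_eq_nil (show min n 0 ≤ (0:Int) by omega)]
    simp
  | succ t ih =>
    have hcast : ((t + 1 : Nat) : Int) = (t : Int) + 1 := by push_cast; ring
    rw [hcast, PySem.List.pyRange_one_succ_right (by positivity), List.foldl_append,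
        List.foldl_cons, List.foldl_nil, ih,
        pv_inner n cols cw ch (t : Int) hc 0 _ (le_refl 0)]
    simp only [add_zero]
    rcases le_or_gt ((t : Int) * cols) n with hge | hlt
    · have h2 : (t : Int) * cols ≤ min n (((t : Int) + 1) * cols) := by
        have : (t : Int) * cols ≤ ((t : Int) + 1) * cols := by nlinarith
        omega
      rw [show min n ((t : Int) * cols) = (t : Int) * cols from by omega, ← List.map_append,
          ← PySem.List.pyRange_one_append 0 ((t : Int) * cols) _ (by positivity) h2]
    · have h1 : min n (((t : Int) + 1) * cols) ≤ (t : Int) * cols := by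
        have := min_le_left n (((t : Int) + 1) * cols); omega
      rw [PySem.List.pyRange_one_eq_nil h1]
      have h2 : min n ((t : Int) * cols) = min n (((t : Int) + 1) * cols) := by
        have : (t : Int) * cols ≤ ((t : Int) + 1) * cols := by nlinarith
        omega
      simp [h2]

-- ===== VERDICT (by name: the statement is the Claim_ definition above) =====
theorem build_xstack_layout_spec : Claim_equal_build_xstack_layout := by
  intro n rows cols cw ch _
  unfold Spec_build_xstack_layout build_xstack_layout build_xstack_layout_alt
  by_cases hpos : 0 < rows ∧ 0 < cols
  · obtain ⟨hr, hc⟩ := hpos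
    rw [if_pos ⟨hr, hc⟩]
    have ht : ((rows.toNat : Nat) : Int) = rows := Int.toNat_of_nonneg (le_of_lt hr)
    have := pv_outer n cols cw ch hc rows.toNat
    rw [ht] at this
    rw [this]; rfl
  · rw [if_neg hpos]
    rw [PySem.List.pyRange_one_eq_nil (le_refl 0), List.map_nil]
    
    rcases not_and_or.mp hpos with hr | hc
    · rw [PySem.List.pyRange_one_eq_nil (by omega : rows ≤ 0)]
      simp
    · rw [PySem.List.pyRange_one_eq_nil (by omega : cols ≤ 0)]
      simp only [List.foldl_nil]
      rw [pv_foldl_const]
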